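-- pv_equiv track=rewrite | github.com/nisargpatel1906/VoiceFlow-Local | cleaner.py | is_duplicate_of_previous
-- ===== SOURCE A (Python) =====
-- def is_duplicate_of_previous(new_chunk: str, previous_transcript: str) -> bool:
--     """
--     Return True when a whole chunk is already present in the recent transcript tail.
--     """
--     new_words = new_chunk.split()
--     if not new_words:
--         return False
--
--     previous_words = previous_transcript.split()
--     if not previous_words:
--         return False
--
--     tail_words = previous_words[-20:]
--     if len(new_words) > len(tail_words):
--         return False
--
--     lowered_new = [word.lower() for word in new_words]
--     lowered_tail = [word.lower() for word in tail_words]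
--     window_size = len(lowered_new)
--
--     for start in range(len(lowered_tail) - window_size + 1):
--         if lowered_tail[start:start + window_size] == lowered_new:
--             return True
--     return False
-- ===== SOURCE B (Python) =====
-- def is_duplicate_of_previous(new_chunk: str, previous_transcript: str) -> bool:
--     """Sentinel-padded substring test instead of an explicit sliding-window scan."""
--     new_words = [w.lower() for w in new_chunk.split()]
--     if not new_words:
--         return False
--     tail_words = [w.lower() for w in previous_transcript.split()[-20:]]
--     if not tail_words:
--         return False
--     return ' ' + ' '.join(new_words) + ' ' in ' ' + ' '.join(tail_words) + ' '
-- ===== Notes on version B (the rewrite author's own statement) =====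
-- stated objective: idiomatic
-- what changed: replaces the explicit sliding-window slice loop over start indices by joining both lowered word lists into space-padded strings and doing a single substring ('in') test, the sentinel spaces enforcing word-boundary alignment
import Mathlib
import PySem

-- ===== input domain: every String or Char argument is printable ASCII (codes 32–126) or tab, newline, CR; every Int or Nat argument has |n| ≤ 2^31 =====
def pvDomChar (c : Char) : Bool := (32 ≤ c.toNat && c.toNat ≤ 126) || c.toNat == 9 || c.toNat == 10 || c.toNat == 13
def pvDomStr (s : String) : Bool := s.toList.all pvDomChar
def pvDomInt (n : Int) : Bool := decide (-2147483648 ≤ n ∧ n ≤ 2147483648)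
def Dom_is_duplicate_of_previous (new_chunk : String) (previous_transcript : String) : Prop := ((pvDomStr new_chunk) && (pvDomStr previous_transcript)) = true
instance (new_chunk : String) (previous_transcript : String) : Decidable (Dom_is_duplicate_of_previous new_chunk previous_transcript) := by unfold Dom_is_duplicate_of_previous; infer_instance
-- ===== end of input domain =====

-- B replaces A's explicit sliding-window slice loop by joining both lowered word
-- lists into space-padded strings and doing a single substring test (idiomatic).

-- ===== PORT A =====
def is_duplicate_of_previous (new_chunk : String) (previous_transcript : String) : Bool :=
  let new_words := PySem.Str.split₀ new_chunk
  if new_words.isEmpty then false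
  else
    let previous_words := PySem.Str.split₀ previous_transcript
    if previous_words.isEmpty then false
    else
      let tail_words := PySem.List.slice previous_words (some (-20)) none
      if new_words.length > tail_words.length then false
      else
        let lowered_new := new_words.map PySem.Str.lower
        let lowered_tail := tail_words.map PySem.Str.lower
        let window_size : Int := lowered_new.length
        (PySem.List.pyRange 0 ((lowered_tail.length : Int) - window_size + 1) 1).any
          (fun start => PySem.List.slice lowered_tail (some start) (some (start + window_size)) == lowered_new)

-- ===== PORT B =====
def is_duplicate_of_previous_alt (new_chunk : String) (previous_transcript : String) : Bool :=
  let new_words := (PySem.Chars.split₀ new_chunk.toList).map PySem.Chars.lower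
  if new_words.isEmpty then false
  else
    let tail_words :=
      (PySem.List.slice (PySem.Chars.split₀ previous_transcript.toList) (some (-20)) none).map
        PySem.Chars.lower
    if tail_words.isEmpty then false
    else
      PySem.Chars.isIn ([' '] ++ PySem.Chars.join [' '] new_words ++ [' '])
        ([' '] ++ PySem.Chars.join [' '] tail_words ++ [' '])

-- ===== PRECONDITION & SPEC =====
def Spec_is_duplicate_of_previous (new_chunk : String) (previous_transcript : String) (out : Bool) : Prop := out = is_duplicate_of_previous_alt new_chunk previous_transcript
instance (new_chunk : String) (previous_transcript : String) (out : Bool) : Decidable (Spec_is_duplicate_of_previous new_chunk previous_transcript out) := by unfold Spec_is_duplicate_of_previous; infer_instance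

-- ===== CLAIM (what is proved, stated in full; the proofs are below) =====
def Claim_equal_is_duplicate_of_previous : Prop := ∀ (new_chunk : String) (previous_transcript : String), Dom_is_duplicate_of_previous new_chunk previous_transcript → Spec_is_duplicate_of_previous new_chunk previous_transcript (is_duplicate_of_previous new_chunk previous_transcript)

-- ===== LEMMAS AND PROOFS =====

def pvGood (w : List Char) : Prop := w ≠ [] ∧ ∀ c ∈ w, PySem.Chars.isspace c = false
def pvPad (ws : List (List Char)) : List Char := ws.flatMap (fun w => w ++ [' '])

theorem pv_isspace_lowerChar (c : Char) :
    PySem.Chars.isspace (PySem.Chars.lowerChar c) = PySem.Chars.isspace c := by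
  unfold PySem.Chars.lowerChar
  by_cases h : PySem.Chars.isupper c = true
  · simp only [h, if_pos]
    have hc : 'A' ≤ c ∧ c ≤ 'Z' := by unfold PySem.Chars.isupper at h; simpa using h
    have h1 : 65 ≤ c.toNat := hc.1
    have h2 : c.toNat ≤ 90 := hc.2
    have hv : (c.toNat + 32).isValidChar := by left; omega
    have ht : (Char.ofNat (c.toNat + 32)).toNat = c.toNat + 32 := by
      simp [Char.ofNat, hv, Char.ofNatAux]; omega
    have hl : PySem.Chars.isspace (Char.ofNat (c.toNat + 32)) = false := by
      simp [PySem.Chars.isspace, ht]; omega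
    have hr : PySem.Chars.isspace c = false := by
      simp [PySem.Chars.isspace]; omega
    rw [hl, hr]
  · simp [h]

theorem pv_good_lower {w : List Char} (h : pvGood w) : pvGood (PySem.Chars.lower w) := by
  refine ⟨by simp [PySem.Chars.lower, h.1], ?_⟩
  intro c hc
  simp only [PySem.Chars.lower, List.mem_map] at hc
  obtain ⟨d, hd, rfl⟩ := hc
  rw [pv_isspace_lowerChar]
  exact h.2 d hd

theorem pv_go_good (s : List Char) : ∀ (cur : List Char) (acc : List (List Char)),
    (∀ c ∈ cur, PySem.Chars.isspace c = false) → (∀ w ∈ acc, pvGood w) →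
    ∀ w ∈ PySem.Chars.split₀.go s cur acc, pvGood w := by
  induction s with
  | nil =>
    intro cur acc hcur hacc w hw
    simp only [PySem.Chars.split₀.go] at hw
    split at hw
    · exact hacc w (by simpa using hw)
    · rename_i hne
      rw [List.mem_reverse, List.mem_cons] at hw
      rcases hw with rfl | hw
      · refine ⟨by simpa [List.isEmpty_iff] using hne, ?_⟩
        intro c hc; exact hcur c (by simpa using hc)
      · exact hacc w hw
  | cons c rest ih =>
    intro cur acc hcur hacc w hw
    simp only [PySem.Chars.split₀.go] at hw
    split at hw
    · rename_i hsp
      split at hw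
      · exact ih [] acc (by simp) hacc w hw
      · rename_i hne
        refine ih [] _ (by simp) ?_ w hw
        intro v hv
        rcases List.mem_cons.mp hv with rfl | hv
        · refine ⟨by simpa [List.isEmpty_iff] using hne, ?_⟩
          intro d hd; exact hcur d (by simpa using hd)
        · exact hacc v hv
    · rename_i hsp
      refine ih (c :: cur) acc ?_ hacc w hw
      intro d hd
      rcases List.mem_cons.mp hd with rfl | hd
      · simpa using hsp
      · exact hcur d hd

theorem pv_split₀_good {s : List Char} : ∀ w ∈ PySem.Chars.split₀ s, pvGood w := by
  intro w hw
  exact pv_go_good s [] [] (by simp) (by simp) w hw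

theorem pv_pad_join (ws : List (List Char)) (h : ws ≠ []) :
    [' '] ++ PySem.Chars.join [' '] ws ++ [' '] = ' ' :: pvPad ws := by
  have key : ∀ (ws : List (List Char)), ws ≠ [] →
      [' '].intercalate ws ++ [' '] = pvPad ws := by
    intro ws
    induction ws with
    | nil => simp
    | cons w tl ih =>
      intro _
      cases tl with
      | nil => simp [List.intercalate, pvPad]
      | cons v tl' =>
        have hI : [' '].intercalate (w :: v :: tl') =
            w ++ [' '] ++ [' '].intercalate (v :: tl') := by simp [List.intercalate]
        rw [hI, List.append_assoc, List.append_assoc, ih (by simp)]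
        simp [pvPad]
  have hk := key ws h
  simp only [PySem.Chars.join]
  rw [List.append_assoc, hk]
  rfl

theorem pv_pad_ends (p : List (List Char)) (h : p ≠ []) : ∃ α, pvPad p = α ++ [' '] := by
  induction p with
  | nil => simp at h
  | cons w tl ih =>
    cases tl with
    | nil => exact ⟨w, by simp [pvPad]⟩
    | cons v tl' =>
      obtain ⟨α, hα⟩ := ih (by simp)
      exact ⟨w ++ [' '] ++ α, by simp [pvPad] at hα ⊢; simp [hα]⟩

theorem pv_pad_append (a b : List (List Char)) : pvPad (a ++ b) = pvPad a ++ pvPad b := by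
  simp [pvPad]

theorem pv_drop_append_ge {α : Type} (l₁ l₂ : List α) (n : Nat) (h : l₁.length ≤ n) :
    (l₁ ++ l₂).drop n = l₂.drop (n - l₁.length) := by
  rw [List.drop_append, List.drop_eq_nil_of_le h, List.nil_append]

theorem pv_space_isspace : PySem.Chars.isspace ' ' = true := by decide

theorem pv_pad_prefix : ∀ (ws ts : List (List Char)),
    (∀ w ∈ ws, pvGood w) → (∀ w ∈ ts, pvGood w) →
    pvPad ws <+: pvPad ts → ws <+: ts := by
  intro ws
  induction ws with
  | nil => intro ts _ _ _; exact List.nil_prefix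
  | cons w ws' ih =>
    intro ts hws hts h
    cases ts with
    | nil =>
      simp [pvPad] at h
    | cons t ts' =>
      have hgw := hws w (by simp)
      have hgt := hts t (by simp)
      have e1 : pvPad (w :: ws') = w ++ ' ' :: pvPad ws' := by simp [pvPad]
      have e2 : pvPad (t :: ts') = t ++ ' ' :: pvPad ts' := by simp [pvPad]
      rw [e1, e2] at h
      have hwt : w = t := by
        rcases Nat.lt_trichotomy w.length t.length with hlt | heq | hgtl
        · exfalso
          have hi : w.length < (w ++ ' ' :: pvPad ws').length := by simp
          have hg := h.getElem hi
          rw [List.getElem_append_right (Nat.le_refl _),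
              List.getElem_append_left hlt] at hg
          simp at hg
          have := hgt.2 _ (List.getElem_mem hlt)
          rw [← hg, pv_space_isspace] at this
          exact Bool.true_eq_false.mp this
        · apply List.ext_getElem heq
          intro i hi₁ hi₂
          have hil : i < (w ++ ' ' :: pvPad ws').length := by simp; omega
          have hg := h.getElem hil
          rwa [List.getElem_append_left hi₁, List.getElem_append_left hi₂] at hg
        · exfalso
          have hi : t.length < (w ++ ' ' :: pvPad ws').length := by simp; omega
          have hg := h.getElem hi
          rw [List.getElem_append_left hgtl,
              List.getElem_append_right (Nat.le_refl _)] at hg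
          simp at hg
          have := hgw.2 _ (List.getElem_mem hgtl)
          rw [hg, pv_space_isspace] at this
          exact Bool.true_eq_false.mp this
      subst hwt
      rw [List.prefix_append_right_inj, List.prefix_cons_inj] at h
      exact List.cons_prefix_cons.mpr
        ⟨rfl, ih ts' (fun v hv => hws v (by simp [hv])) (fun v hv => hts v (by simp [hv])) h⟩

theorem pv_pad_aux (ws : List (List Char)) (hws : ∀ w ∈ ws, pvGood w) :
    ∀ (ts : List (List Char)), (∀ w ∈ ts, pvGood w) →
    ∀ k, (' ' :: pvPad ws) <+: (pvPad ts).drop k → ws <:+: ts := by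
  intro ts
  induction ts with
  | nil =>
    intro _ k h
    rw [show pvPad [] = [] from rfl, List.drop_nil] at h
    exact absurd (List.prefix_nil.mp h) (by simp)
  | cons t ts' ih =>
    intro hts k h
    have hgt := hts t (by simp)
    have hts' : ∀ w ∈ ts', pvGood w := fun v hv => hts v (by simp [hv])
    have e2 : pvPad (t :: ts') = t ++ ' ' :: pvPad ts' := by simp [pvPad]
    rw [e2] at h
    rcases Nat.lt_trichotomy k t.length with hk | hk | hk
    · exfalso
      rw [List.drop_append_of_le_length (Nat.le_of_lt hk)] at h
      have h0 : 0 < (' ' :: pvPad ws).length := by simp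
      have hg := h.getElem h0
      have hdk : 0 < (t.drop k).length := by simp; omega
      rw [List.getElem_append_left hdk] at hg
      rw [List.getElem_drop] at hg
      simp at hg
      have := hgt.2 _ (List.getElem_mem (by omega))
      rw [← hg, pv_space_isspace] at this
      exact Bool.true_eq_false.mp this
    · subst hk
      rw [pv_drop_append_ge _ _ _ (Nat.le_refl _), Nat.sub_self, List.drop_zero] at h
      rw [List.prefix_cons_inj] at h
      exact List.infix_cons (pv_pad_prefix ws ts' hws hts' h).isInfix
    · rw [pv_drop_append_ge _ _ _ (Nat.le_of_lt hk)] at h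
      have hk2 : (' ' :: pvPad ts').drop (k - t.length) = (pvPad ts').drop (k - t.length - 1) := by
        rw [show k - t.length = (k - t.length - 1) + 1 by omega, List.drop_succ_cons]
        rfl
      rw [hk2] at h
      exact List.infix_cons (ih hts' _ h)

theorem pv_pad_infix_iff (ws ts : List (List Char))
    (hws : ∀ w ∈ ws, pvGood w) (hts : ∀ w ∈ ts, pvGood w) :
    ((' ' :: pvPad ws) <:+: (' ' :: pvPad ts)) ↔ ws <:+: ts := by
  constructor
  · rintro ⟨p, q, hpq⟩
    cases p with
    | nil =>
      have hpre : (' ' :: pvPad ws) <+: (' ' :: pvPad ts) := ⟨q, by simpa using hpq⟩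
      rw [List.prefix_cons_inj] at hpre
      exact (pv_pad_prefix ws ts hws hts hpre).isInfix
    | cons c p' =>
      simp only [List.cons_append, List.append_assoc] at hpq
      injection hpq with h1 h2
      have hpre : (' ' :: pvPad ws) <+: (pvPad ts).drop p'.length := by
        rw [← h2, List.drop_left]
        exact ⟨q, rfl⟩
      exact pv_pad_aux ws hws ts hts p'.length hpre
  · rintro ⟨p, q, hpq⟩
    cases p with
    | nil =>
      refine ⟨[], pvPad q, ?_⟩
      simp only [List.nil_append] at hpq ⊢
      rw [← hpq, pv_pad_append]
      simp
    | cons x p' =>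
      obtain ⟨α, hα⟩ := pv_pad_ends (x :: p') (by simp)
      refine ⟨' ' :: α, pvPad q, ?_⟩
      rw [← hpq, pv_pad_append, pv_pad_append, hα]
      simp

theorem pv_window_iff_infix {α : Type} (ln lt : List α) (hw : ln.length ≤ lt.length) :
    (∃ j : ℕ, j < lt.length - ln.length + 1 ∧ (lt.drop j).take ln.length = ln) ↔ ln <:+: lt := by
  constructor
  · rintro ⟨j, _, hj⟩
    rw [← hj]
    exact List.infix_iff_prefix_suffix.mpr ⟨lt.drop j, List.take_prefix _ _, List.drop_suffix _ _⟩
  · rintro ⟨p, q, hpq⟩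
    refine ⟨p.length, ?_, ?_⟩
    · have : lt.length = p.length + ln.length + q.length := by rw [← hpq]; simp; omega
      omega
    · rw [← hpq, List.append_assoc, List.drop_left, List.take_left]

theorem pv_infix_map_iff {α β : Type} (f : α → β) (hf : Function.Injective f)
    (a b : List α) : (a.map f <:+: b.map f) ↔ a <:+: b := by
  constructor
  · rintro ⟨p, q, hpq⟩
    rw [List.append_assoc] at hpq
    obtain ⟨p', rest, hb, hp', hrest⟩ := List.map_eq_append_iff.mp hpq.symm
    obtain ⟨a', q', hrest2, ha', hq'⟩ := List.map_eq_append_iff.mp hrest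
    have ha : a' = a := List.map_injective_iff.mpr hf ha'
    exact ⟨p', q', by rw [hb, hrest2, ha, List.append_assoc]⟩
  · rintro ⟨p, q, hpq⟩
    exact ⟨p.map f, q.map f, by rw [← hpq]; simp⟩
theorem pv_toList_inj : Function.Injective String.toList :=
  @fun _ _ h => String.toList_injective h

theorem pv_main (new_chunk previous_transcript : String) :
    is_duplicate_of_previous new_chunk previous_transcript
      = is_duplicate_of_previous_alt new_chunk previous_transcript := by
  unfold is_duplicate_of_previous is_duplicate_of_previous_alt
  dsimp only
  set nwS := PySem.Str.split₀ new_chunk with hnwS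
  set pwS := PySem.Str.split₀ previous_transcript with hpwS
  have hbridge_n : nwS.map String.toList = PySem.Chars.split₀ new_chunk.toList :=
    PySem.Str.split₀_map_toList new_chunk
  have hbridge_p : pwS.map String.toList = PySem.Chars.split₀ previous_transcript.toList :=
    PySem.Str.split₀_map_toList previous_transcript
  rw [← hbridge_n, ← hbridge_p]
  by_cases h1 : nwS.isEmpty
  · rw [if_pos h1]
    rw [List.isEmpty_iff.mp h1]
    simp
  · have hnwne : nwS ≠ [] := fun h => h1 (List.isEmpty_iff.mpr h)
    have hA1 : nwS.isEmpty = false := Bool.not_eq_true _ ▸ Bool.eq_false_iff.mpr (fun h => h1 h)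
    have hB1 : ((nwS.map String.toList).map PySem.Chars.lower).isEmpty = false := by
      simp [hnwne]
    rw [hA1, hB1]
    by_cases h2 : pwS.isEmpty
    · rw [List.isEmpty_iff.mp h2]
      simp [PySem.List.slice]
    · have hpwne : pwS ≠ [] := fun h => h2 (List.isEmpty_iff.mpr h)
      have hA2 : pwS.isEmpty = false := Bool.eq_false_iff.mpr (fun h => h2 h)
      rw [hA2]
      simp only [Bool.false_eq_true, if_false]
      have htail : PySem.List.slice pwS (some (-20)) none = pwS.drop (pwS.length - 20) :=
        PySem.List.slice_from_neg_ofNat pwS 20 (by omega)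
      have hlen0 : pwS.length ≠ 0 := fun h => hpwne (List.length_eq_zero_iff.mp h)
      have htailC : PySem.List.slice (pwS.map String.toList) (some (-20)) none
          = (pwS.drop (pwS.length - 20)).map String.toList := by
        rw [PySem.List.slice_from_neg_ofNat _ 20 (by omega), List.length_map, List.map_drop]
      rw [htail, htailC]
      set tailS := pwS.drop (pwS.length - 20) with htailS
      have htailne : tailS ≠ [] := by
        apply List.ne_nil_of_length_pos
        rw [htailS, List.length_drop]
        omega
      have hB2 : ((tailS.map String.toList).map PySem.Chars.lower).isEmpty = false := by
        simp [htailne]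
      rw [hB2]
      simp only [Bool.false_eq_true, if_false]
      have hlnC : (nwS.map String.toList).map PySem.Chars.lower
          = (nwS.map PySem.Str.lower).map String.toList := by
        simp only [List.map_map]
        exact List.map_congr_left (fun a _ => (PySem.Str.toList_lower a).symm)
      have hltC : (tailS.map String.toList).map PySem.Chars.lower
          = (tailS.map PySem.Str.lower).map String.toList := by
        simp only [List.map_map]
        exact List.map_congr_left (fun a _ => (PySem.Str.toList_lower a).symm)
      have hgn : ∀ w ∈ (nwS.map PySem.Str.lower).map String.toList, pvGood w := by
        intro w hw
        rw [← hlnC] at hw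
        obtain ⟨v, hv, rfl⟩ := List.mem_map.mp hw
        exact pv_good_lower (pv_split₀_good v (hbridge_n ▸ hv))
      have hgt : ∀ w ∈ (tailS.map PySem.Str.lower).map String.toList, pvGood w := by
        intro w hw
        rw [← hltC] at hw
        obtain ⟨v, hv, rfl⟩ := List.mem_map.mp hw
        have hv2 : v ∈ pwS.map String.toList := by
          rw [htailS, List.map_drop] at hv
          exact List.mem_of_mem_drop hv
        exact pv_good_lower (pv_split₀_good v (hbridge_p ▸ hv2))
      rw [hlnC, hltC,
        pv_pad_join _ (by simp [hnwne]), pv_pad_join _ (by simp [htailne])]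
      set lnS := nwS.map PySem.Str.lower with hlnS
      set ltS := tailS.map PySem.Str.lower with hltS
      have hlen_n : lnS.length = nwS.length := by rw [hlnS, List.length_map]
      have hlen_t : ltS.length = tailS.length := by rw [hltS, List.length_map]
      have hiff : PySem.Chars.isIn (' ' :: pvPad (lnS.map String.toList))
          (' ' :: pvPad (ltS.map String.toList)) = true ↔ lnS <:+: ltS := by
        rw [PySem.Chars.isIn_iff_infix, pv_pad_infix_iff _ _ hgn hgt,
          pv_infix_map_iff _ pv_toList_inj]
      by_cases h3 : nwS.length > tailS.length
      · rw [if_pos h3]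
        symm
        by_contra hB
        rw [Bool.not_eq_false] at hB
        have hle := (hiff.mp hB).length_le
        rw [hlen_n, hlen_t] at hle
        omega
      · rw [if_neg h3]
        replace h3 : nwS.length ≤ tailS.length := Nat.le_of_not_lt h3
        rw [Bool.eq_iff_iff, hiff,
          ← pv_window_iff_infix lnS ltS (by rw [hlen_n, hlen_t]; exact h3),
          List.any_eq_true]
        constructor
        · rintro ⟨x, hx, hp⟩
          rw [PySem.List.mem_pyRange_iff_of_pos (by omega : (0:Int) < 1)] at hx
          obtain ⟨hx0, hxb, -⟩ := hx
          lift x to ℕ using hx0 with j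
          refine ⟨j, ?_, ?_⟩
          · rw [hlen_n, hlen_t] at *
            omega
          · rw [PySem.List.slice_natCast_add] at hp
            exact eq_of_beq hp
        · rintro ⟨j, hj, htake⟩
          refine ⟨(j : Int), ?_, ?_⟩
          · rw [PySem.List.mem_pyRange_iff_of_pos (by omega : (0:Int) < 1)]
            refine ⟨by positivity, by omega, one_dvd _⟩
          · rw [PySem.List.slice_natCast_add, htake]
            exact beq_self_eq_true lnS

-- ===== VERDICT (by name: the statement is the Claim_ definition above) =====
theorem is_duplicate_of_previous_spec : Claim_equal_is_duplicate_of_previous := by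
  intro new_chunk previous_transcript _
  unfold Spec_is_duplicate_of_previous
  exact pv_main new_chunk previous_transcript
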